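/- GENERATED by c/gen_decode.py: decode facts of the image, one per distinct instruction byte string. -/
import UserX.DecodeImage

#decode_all Vorbis.Dec
  "0f28c6"  -- movaps xmm0,xmm6
  "0f844cffffff"  -- je 11156d
  "0f84f1000000"  -- je 10f290
  "0f8836feffff"  -- js 10dcad
  "0f8f30ffffff"  -- jg 1070bf
  "0fb6920000c000"  -- movzx edx,BYTE PTR [rdx+0xc00000]
  "398540010000"  -- cmp DWORD PTR [rbp+0x140],eax
  "410fb60c24"  -- movzx ecx,BYTE PTR [r12]
  "413b9ef0060000"  -- cmp ebx,DWORD PTR [r14+0x6f0]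
  "41885e19"  -- mov BYTE PTR [r14+0x19],bl
  "418b4e1c"  -- mov ecx,DWORD PTR [r14+0x1c]
  "41c7450000000000"  -- mov DWORD PTR [r13+0x0],0x0
  "438d1c3c"  -- lea ebx,[r12+r15*1]
  "4439b5e0010000"  -- cmp DWORD PTR [rbp+0x1e0],r14d
  "44896d0c"  -- mov DWORD PTR [rbp+0xc],r13d
  "4489f1"  -- mov ecx,r14d
  "448ba548ffffff"  -- mov r12d,DWORD PTR [rbp-0xb8]
  "45396c2404"  -- cmp DWORD PTR [r12+0x4],r13d
  "458b2e"  -- mov r13d,DWORD PTR [r14]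
  "4801ee"  -- add rsi,rbp
  "48636c2418"  -- movsxd rbp,DWORD PTR [rsp+0x18]
  "488345c004"  -- add QWORD PTR [rbp-0x40],0x4
  "4889342558f01f00"  -- mov QWORD PTR ds:0x1ff058,rsi
  "4889de"  -- mov rsi,rbx
  "488b742418"  -- mov rsi,QWORD PTR [rsp+0x18]
  "488d1cc6"  -- lea rbx,[rsi+rax*8]
  "488d7b20"  -- lea rdi,[rbx+0x20]
  "488d8424800b0000"  -- lea rax,[rsp+0xb80]
  "488dbbf8060000"  -- lea rdi,[rbx+0x6f8]
  "48be000000000000f03f"  -- movabs rsi,0x3ff0000000000000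
  "48d1e8"  -- shr rax,1
  "4963ec"  -- movsxd rbp,r12d
  "4989fe"  -- mov r14,rdi
  "498d7d1b"  -- lea rdi,[r13+0x1b]
  "49c1e402"  -- shl r12,0x2
  "4a8dbce368030000"  -- lea rdi,[rbx+r12*8+0x368]
  "4c63742418"  -- movsxd r14,DWORD PTR [rsp+0x18]
  "4c89e7"  -- mov rdi,r12
  "4c8bb558ffffff"  -- mov r14,QWORD PTR [rbp-0xa8]
  "4d0364de08"  -- add r12,QWORD PTR [r14+rbx*8+0x8]
  "4d8d6628"  -- lea r12,[r14+0x28]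
  "660f2f0570dd0100"  -- comisd xmm0,QWORD PTR [rip+0x1dd70]
  "66410f7ec4"  -- movd r12d,xmm0
  "66897c2418"  -- mov WORD PTR [rsp+0x18],di
  "742b"  -- je 107289
  "7520"  -- jne 1138c4
  "7829"  -- js 10e408
  "7e29"  -- jle 11520c
  "807c241e00"  -- cmp BYTE PTR [rsp+0x1e],0x0
  "83bdd8060000ff"  -- cmp DWORD PTR [rbp+0x6d8],0xffffffff
  "892b"  -- mov DWORD PTR [rbx],ebp
  "898384000000"  -- mov DWORD PTR [rbx+0x84],eax
  "8b00"  -- mov eax,DWORD PTR [rax]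
  "8b6bf4"  -- mov ebp,DWORD PTR [rbx-0xc]
  "8bb544ffffff"  -- mov esi,DWORD PTR [rbp-0xbc]
  "ba10070000"  -- mov edx,0x710
  "c1ff03"  -- sar edi,0x3
  "c7830407000000000000"  -- mov DWORD PTR [rbx+0x704],0x0
  "e80186ffff"  -- call 10d1c0
  "e80afcffff"  -- call 102920
  "e815f7feff"  -- call 100560
  "e81eccffff"  -- call 108f20
  "e828fafeff"  -- call 100800
  "e8316dffff"  -- call 10d1c0
  "e83beafeff"  -- call 100640
  "e8479efeff"  -- call 100640
  "e851b8feff"  -- call 100640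
  "e85d3affff"  -- call 100300
  "e86a83ffff"  -- call 100640
  "e875f2feff"  -- call 100720
  "e8806bffff"  -- call 100640
  "e88c10ffff"  -- call 104c60
  "e89578ffff"  -- call 100300
  "e89fb7feff"  -- call 100640
  "e8aa4effff"  -- call 1003c0
  "e8b38f0000"  -- call 10c600
  "e8be10ffff"  -- call 104d40
  "e8c88cffff"  -- call 100640
  "e8d20cffff"  -- call 104e20
  "e8dc1effff"  -- call 100300
  "e8e5fcfeff"  -- call 103d00
  "e8ee0effff"  -- call 100300
  "e8f8a5ffff"  -- call 100640
  "e916e9ffff"  -- jmp 113b22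
  "e960ffffff"  -- jmp 1116e1
  "e9adfeffff"  -- jmp 10f7a5
  "e9fffeffff"  -- jmp 112f26
  "eb97"  -- jmp 10edcd
  "ebf0"  -- jmp 10bb51
  "f20f590424"  -- mulsd xmm0,QWORD PTR [rsp]
  "f20f5e1db0e10100"  -- divsd xmm3,QWORD PTR [rip+0x1e1b0]
  "f30f1055c0"  -- movss xmm2,DWORD PTR [rbp-0x40]
  "f30f107c241c"  -- movss xmm7,DWORD PTR [rsp+0x1c]
  "f30f1155a8"  -- movss DWORD PTR [rbp-0x58],xmm2
  "f30f117da0"  -- movss DWORD PTR [rbp-0x60],xmm7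
  "f30f590588470100"  -- mulss xmm0,DWORD PTR [rip+0x14788]
  "f30f5c5be4"  -- subss xmm3,DWORD PTR [rbx-0x1c]
  "f3410f105d00"  -- movss xmm3,DWORD PTR [r13+0x0]
  "f683d306000001"  -- test BYTE PTR [rbx+0x6d3],0x1
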